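-- pv_equiv track=rewrite | github.com/NickStafford2/PyImportGraph | src/pyimportgraph/analysis/project_model.py | _build_mutual_dependency_packages_by_package
-- ===== SOURCE A (Python) =====
-- def _build_mutual_dependency_packages_by_package(
--     reciprocal_pairs: tuple[tuple[str, str], ...],
-- ) -> dict[str, tuple[str, ...]]:
--     values: dict[str, set[str]] = {}
--
--     for source_package_name, target_package_name in reciprocal_pairs:
--         values.setdefault(source_package_name, set()).add(target_package_name)
--
--     return {
--         package_name: tuple(sorted(other_package_names))
--         for package_name, other_package_names in sorted(values.items())
--     }
-- ===== SOURCE B (Python) =====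
-- def _build_mutual_dependency_packages_by_package(
--     reciprocal_pairs: tuple[tuple[str, str], ...],
-- ) -> dict[str, tuple[str, ...]]:
--     # Sort the pairs once; then one ordered pass groups equal sources
--     # (consecutive after sorting) and dedups targets by adjacency, so no
--     # sets and no per-key sorting are needed.
--     result: dict[str, tuple[str, ...]] = {}
--     for source, target in sorted(reciprocal_pairs):
--         if source not in result:
--             result[source] = (target,)
--         elif result[source][-1] != target:
--             result[source] = result[source] + (target,)
--     return result
-- ===== Notes on version B (the rewrite author's own statement) =====
-- stated objective: alternative
-- what changed: Instead of building a dict of sets and then sorting both the items and every set, B sorts the pair list once and makes a single ordered pass that groups consecutive equal sources and dedups targets by comparing with the last appended one, so no sets and no per-key sorted() are needed.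
import Mathlib
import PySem

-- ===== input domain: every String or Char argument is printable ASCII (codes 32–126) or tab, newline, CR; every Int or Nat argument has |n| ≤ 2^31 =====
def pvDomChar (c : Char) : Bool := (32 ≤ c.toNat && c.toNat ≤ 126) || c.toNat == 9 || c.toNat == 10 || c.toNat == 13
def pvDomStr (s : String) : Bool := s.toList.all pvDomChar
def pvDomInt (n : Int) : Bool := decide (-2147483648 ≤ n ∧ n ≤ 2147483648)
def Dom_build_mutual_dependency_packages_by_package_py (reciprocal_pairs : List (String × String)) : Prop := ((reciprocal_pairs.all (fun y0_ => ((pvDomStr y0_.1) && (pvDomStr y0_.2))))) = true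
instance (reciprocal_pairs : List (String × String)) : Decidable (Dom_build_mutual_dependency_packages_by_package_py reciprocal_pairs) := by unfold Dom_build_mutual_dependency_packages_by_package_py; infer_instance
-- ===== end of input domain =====

-- B replaces A's dict-of-sets + double sorted() by one sort of the pair list and a single
-- ordered pass with adjacency dedup (objective: alternative decomposition, same O(n log n)).

-- ===== PORT A =====
-- values.setdefault(k, set()).add(v) mutates the set stored at key k in place:
-- exactly Dict.modify k ∅ (Set.add · v).
def pvAStep (d : PySem.Dict String (PySem.Set String)) (p : String × String) :
    PySem.Dict String (PySem.Set String) :=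
  d.modify p.1 [] (fun s => PySem.Set.add s p.2)

-- sorted(values.items()) compares tuples, but dict keys are unique so only the
-- first components are ever compared: ported as sorting keyed on the first component.
def build_mutual_dependency_packages_by_package_py (reciprocal_pairs : List (String × String)) : List (String × List String) :=
  -- values = the dict built by the for-loop
  (PySem.List.sorted (reciprocal_pairs.foldl pvAStep PySem.Dict.empty).items (fun p => p.1)).map
    (fun p => (p.1, PySem.List.sorted p.2 (fun t => t)))

-- ===== PORT B =====
-- result[source][-1]: that list is never empty when this line runs, so the total
-- pyGetD with a dummy default "" renders the Python index exactly.
def pvBStep (d : PySem.Dict String (List String)) (p : String × String) :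
    PySem.Dict String (List String) :=
  if d.contains p.1 = false then d.insert p.1 [p.2]
  else if PySem.List.pyGetD (d.getD p.1 []) (-1) "" ≠ p.2 then
    d.insert p.1 (d.getD p.1 [] ++ [p.2])
  else d

-- sorted(reciprocal_pairs) compares the 2-tuples lexicographically: PySem.List.sorted2.
def build_mutual_dependency_packages_by_package_py_alt (reciprocal_pairs : List (String × String)) : List (String × List String) :=
  ((PySem.List.sorted2 reciprocal_pairs (fun p => p.1) (fun p => p.2)).foldl
    pvBStep PySem.Dict.empty).items

-- ===== PRECONDITION & SPEC =====
def Spec_build_mutual_dependency_packages_by_package_py (reciprocal_pairs : List (String × String)) (out : List (String × List String)) : Prop := out = build_mutual_dependency_packages_by_package_py_alt reciprocal_pairs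
instance (reciprocal_pairs : List (String × String)) (out : List (String × List String)) : Decidable (Spec_build_mutual_dependency_packages_by_package_py reciprocal_pairs out) := by unfold Spec_build_mutual_dependency_packages_by_package_py; infer_instance

-- ===== CLAIM (what is proved, stated in full; the proofs are below) =====
def Claim_equal_build_mutual_dependency_packages_by_package_py : Prop := ∀ (reciprocal_pairs : List (String × String)), Dom_build_mutual_dependency_packages_by_package_py reciprocal_pairs → Spec_build_mutual_dependency_packages_by_package_py reciprocal_pairs (build_mutual_dependency_packages_by_package_py reciprocal_pairs)

-- ===== LEMMAS AND PROOFS =====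

-- the targets of key k, in list order
def pvTgts (l : List (String × String)) (k : String) : List String :=
  (l.filter (fun p => p.1 == k)).map (fun p => p.2)

-- B's per-key action on the stored list
def pvAded (acc : List String) (t : String) : List String :=
  if acc = [] then [t]
  else if PySem.List.pyGetD acc (-1) "" ≠ t then acc ++ [t] else acc

-- the (non-strict) lexicographic order sorted2 produces
def pvLexLe (p q : String × String) : Prop := p.1 < q.1 ∨ (p.1 = q.1 ∧ p.2 ≤ q.2)

-- the strict lexicographic comparison sorted2 inserts by
def pvBefore (p q : String × String) : Bool :=
  decide (p.1 < q.1) || (!decide (q.1 < p.1) && decide (p.2 < q.2))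

-- invariant of B's loop: every stored value list is nonempty
def pvInv (d : PySem.Dict String (List String)) : Prop :=
  ∀ k, d.contains k = true → d.getD k [] ≠ []

lemma pvA_getD (l : List (String × String)) :
    ∀ (d : PySem.Dict String (PySem.Set String)) (k : String),
      (l.foldl pvAStep d).getD k [] = (pvTgts l k).foldl PySem.Set.add (d.getD k []) := by
  induction l with
  | nil => intro d k; simp [pvTgts]
  | cons p l ih =>
    intro d k
    by_cases hk : p.1 = k
    · simp [pvTgts, hk, List.foldl_cons, ih, pvAStep,
        PySem.Dict.getD_modify_self]
    · simp [pvTgts, hk, List.foldl_cons, ih, pvAStep,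
        PySem.Dict.getD_modify, Ne.symm hk]

lemma pvA_keys (l : List (String × String)) :
    (l.foldl pvAStep PySem.Dict.empty).keys = PySem.Set.ofList (l.map (fun p => p.1)) := by
  have h := PySem.Dict.keys_foldl_modify_key l (fun p => p.1) ([] : PySem.Set String)
    (fun _ p => fun s => PySem.Set.add s p.2) PySem.Dict.empty
  simpa [pvAStep, PySem.Set.update_nil_left, PySem.Dict.keys_empty] using h

lemma pvA_nodup (l : List (String × String)) :
    (l.foldl pvAStep PySem.Dict.empty).keys.Nodup := by
  rw [pvA_keys]; exact PySem.Set.nodup_ofList _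

lemma pvBStep_keys (d : PySem.Dict String (List String)) (p : String × String) :
    (pvBStep d p).keys = PySem.Set.add d.keys p.1 := by
  unfold pvBStep
  by_cases hc : d.contains p.1 = false
  · rw [if_pos hc, PySem.Dict.keys_insert_of_not_contains d _ hc,
      PySem.Set.add_of_not_mem]
    intro hm
    rw [← PySem.Dict.contains_iff_mem_keys] at hm
    simp [hc] at hm
  · have hc' : d.contains p.1 = true := by simpa using hc
    have hm : p.1 ∈ d.keys := (PySem.Dict.contains_iff_mem_keys d p.1).mp hc'
    rw [if_neg hc]
    split_ifs with h
    · rw [PySem.Dict.keys_insert_of_contains d _ hc', PySem.Set.add_of_mem hm]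
    · rw [PySem.Set.add_of_mem hm]

lemma pvB_keys (l : List (String × String)) :
    ∀ d, (l.foldl pvBStep d).keys = PySem.Set.update d.keys (l.map (fun p => p.1)) := by
  induction l with
  | nil => intro d; simp [PySem.Set.update]
  | cons p l ih =>
    intro d
    rw [List.foldl_cons, ih, pvBStep_keys, List.map_cons, PySem.Set.update_cons]

lemma pvB_nodup (l : List (String × String)) :
    (l.foldl pvBStep PySem.Dict.empty).keys.Nodup := by
  rw [pvB_keys]
  exact PySem.Set.nodup_update _ _ (by simp [PySem.Dict.keys_empty])

lemma pvInv_step (d : PySem.Dict String (List String)) (p : String × String)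
    (h : pvInv d) : pvInv (pvBStep d p) := by
  unfold pvBStep
  split_ifs with h1 h2 <;> intro k hk
  · rw [PySem.Dict.getD_insert]
    split_ifs with he
    · simp
    · exact h k (by simpa [PySem.Dict.contains_insert, he] using hk)
  · rw [PySem.Dict.getD_insert]
    split_ifs with he
    · simp
    · exact h k (by simpa [PySem.Dict.contains_insert, he] using hk)
  · exact h k hk

lemma pvB_getD (l : List (String × String)) :
    ∀ (d : PySem.Dict String (List String)) (k : String), pvInv d →
      (l.foldl pvBStep d).getD k [] = (pvTgts l k).foldl pvAded (d.getD k []) := by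
  induction l with
  | nil => intro d k _; simp [pvTgts]
  | cons p l ih =>
    intro d k hinv
    rw [List.foldl_cons, ih _ _ (pvInv_step d p hinv)]
    by_cases hk : p.1 = k
    · subst hk
      have hstep : (pvBStep d p).getD p.1 [] = pvAded (d.getD p.1 []) p.2 := by
        unfold pvBStep pvAded
        by_cases hc : d.contains p.1 = false
        · have h0 := PySem.Dict.getD_of_not_contains d ([] : List String) hc
          rw [if_pos hc, PySem.Dict.getD_insert_self, h0]
          simp
        · have hc' : d.contains p.1 = true := by simpa using hc
          have hne : d.getD p.1 [] ≠ [] := hinv _ hc'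
          rw [if_neg hc, if_neg hne]
          split_ifs with h2
          · rw [PySem.Dict.getD_insert_self]
          · rfl
      simp [pvTgts, hstep]
    · have hstep : (pvBStep d p).getD k [] = d.getD k [] := by
        unfold pvBStep
        split_ifs with h1 h2
        · rw [PySem.Dict.getD_insert_of_ne _ _ _ (Ne.symm hk)]
        · rw [PySem.Dict.getD_insert_of_ne _ _ _ (Ne.symm hk)]
        · rfl
      simp [pvTgts, hk, hstep]

lemma pv_le_getLast_of_pairwise_lt {α : Type} [LinearOrder α] (acc : List α)
    (h : acc.Pairwise (· < ·)) (hne : acc ≠ []) :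
    ∀ a ∈ acc, a ≤ acc.getLast hne := by
  induction acc with
  | nil => simp
  | cons x xs ih =>
    intro a ha
    rcases List.mem_cons.mp ha with rfl | ha'
    · rcases xs with _ | ⟨y, ys⟩
      · simp
      · rw [List.getLast_cons (by simp)]
        have hlt : a < y := (List.pairwise_cons.mp h).1 y (by simp)
        have := ih (List.pairwise_cons.mp h).2 (by simp) y (by simp)
        exact le_of_lt (lt_of_lt_of_le hlt this)
    · have hne' : xs ≠ [] := List.ne_nil_of_mem ha'
      rw [List.getLast_cons hne']
      exact ih (List.pairwise_cons.mp h).2 hne' a ha'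

lemma pvAded_main (ws : List String) :
    ∀ acc, ws.Pairwise (· ≤ ·) → acc.Pairwise (· < ·) →
      (∀ w ∈ ws, ∀ a ∈ acc, a ≤ w) →
      ws.foldl pvAded acc = PySem.Set.update acc ws ∧
        (ws.foldl pvAded acc).Pairwise (· < ·) := by
  induction ws with
  | nil => intro acc _ hp _; exact ⟨by simp [PySem.Set.update], hp⟩
  | cons w ws ih =>
    intro acc hws hp hub
    have hstep : pvAded acc w = PySem.Set.add acc w := by
      unfold pvAded
      by_cases hnil : acc = []
      · subst hnil; simp [PySem.Set.add]
      · rw [if_neg hnil, PySem.List.pyGetD_neg_one acc "" hnil]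
        by_cases hlast : acc.getLast hnil = w
        · rw [if_neg (by simp [hlast]), PySem.Set.add_of_mem (hlast ▸ List.getLast_mem hnil)]
        · rw [if_pos hlast, PySem.Set.add_of_not_mem]
          intro hmem
          have h1 : w ≤ acc.getLast hnil := pv_le_getLast_of_pairwise_lt acc hp hnil w hmem
          have h2 : acc.getLast hnil ≤ w := hub w (by simp) _ (List.getLast_mem hnil)
          exact hlast (le_antisymm h2 h1)
    have hp' : (PySem.Set.add acc w).Pairwise (· < ·) := by
      by_cases hmem : w ∈ acc
      · rwa [PySem.Set.add_of_mem hmem]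
      · rw [PySem.Set.add_of_not_mem hmem]
        rw [List.pairwise_append]
        refine ⟨hp, by simp, ?_⟩
        intro a ha b hb
        rw [List.mem_singleton] at hb; subst hb
        exact lt_of_le_of_ne (hub b (by simp) a ha) (fun h => hmem (h ▸ ha))
    have hub' : ∀ v ∈ ws, ∀ a ∈ PySem.Set.add acc w, a ≤ v := by
      intro v hv a ha
      rcases (PySem.Set.mem_add acc w a).mp ha with ha' | rfl
      · exact hub v (by simp [hv]) a ha'
      · exact (List.pairwise_cons.mp hws).1 v hv
    have := ih (PySem.Set.add acc w) (List.pairwise_cons.mp hws).2 hp' hub'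
    refine ⟨?_, by rw [List.foldl_cons, hstep]; exact this.2⟩
    rw [List.foldl_cons, hstep, this.1, PySem.Set.update_cons]

lemma pvAded_ofList (ws : List String) (h : ws.Pairwise (· ≤ ·)) :
    ws.foldl pvAded [] = PySem.Set.ofList ws ∧
      (PySem.Set.ofList ws : List String).Pairwise (· < ·) := by
  have := pvAded_main ws [] h (by simp) (by simp)
  rw [PySem.Set.update_nil_left] at this
  exact ⟨this.1, this.1 ▸ this.2⟩

lemma pvLexLe_trans {p q r : String × String} (h1 : pvLexLe p q) (h2 : pvLexLe q r) :
    pvLexLe p r := by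
  rcases h1 with h1 | ⟨h1, h1'⟩ <;> rcases h2 with h2 | ⟨h2, h2'⟩
  · exact Or.inl (lt_trans h1 h2)
  · exact Or.inl (h2 ▸ h1)
  · exact Or.inl (h1 ▸ h2)
  · exact Or.inr ⟨h1.trans h2, le_trans h1' h2'⟩

lemma pvBefore_true {p q : String × String} (h : pvBefore p q = true) : pvLexLe p q := by
  simp only [pvBefore, Bool.or_eq_true, Bool.and_eq_true, Bool.not_eq_true',
    decide_eq_true_eq, decide_eq_false_iff_not] at h
  rcases h with h | ⟨h1, h2⟩
  · exact Or.inl h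
  · rcases lt_or_ge p.1 q.1 with hl | hl
    · exact Or.inl hl
    · exact Or.inr ⟨le_antisymm (not_lt.mp h1) hl, le_of_lt h2⟩

lemma pvBefore_false {p q : String × String} (h : pvBefore p q = false) : pvLexLe q p := by
  simp only [pvBefore, Bool.or_eq_false_iff, Bool.and_eq_false_iff, Bool.not_eq_false',
    decide_eq_true_eq, decide_eq_false_iff_not] at h
  rcases h with ⟨h1, h2⟩
  rcases lt_or_ge q.1 p.1 with hl | hl
  · exact Or.inl hl
  · have heq : q.1 = p.1 := (le_antisymm hl (not_lt.mp h1)).symm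
    rcases h2 with h2 | h2
    · exact absurd h2 (by rw [heq]; exact lt_irrefl _)
    · exact Or.inr ⟨heq, not_lt.mp h2⟩

lemma pvInsertBy_pairwise (x : String × String) (ys : List (String × String))
    (h : ys.Pairwise pvLexLe) :
    (PySem.List.insertBy pvBefore x ys).Pairwise pvLexLe := by
  induction ys with
  | nil => simp [PySem.List.insertBy]
  | cons y ys ih =>
    rw [PySem.List.insertBy]
    rcases List.pairwise_cons.mp h with ⟨hy, hys⟩
    by_cases hb : pvBefore x y = true
    · rw [if_pos hb]
      refine List.pairwise_cons.mpr ⟨?_, h⟩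
      intro z hz
      rcases List.mem_cons.mp hz with rfl | hz'
      · exact pvBefore_true hb
      · exact pvLexLe_trans (pvBefore_true hb) (hy z hz')
    · rw [if_neg hb]
      refine List.pairwise_cons.mpr ⟨?_, ih hys⟩
      intro z hz
      rcases (PySem.List.mem_insertBy pvBefore x z ys).mp hz with rfl | hz'
      · exact pvBefore_false (by simpa using hb)
      · exact hy z hz'

lemma pvSorted2_pairwise (l : List (String × String)) :
    (PySem.List.sorted2 l (fun p => p.1) (fun p => p.2)).Pairwise pvLexLe := by
  have hgen : ∀ (acc : List (String × String)), acc.Pairwise pvLexLe →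
      (l.foldl (fun acc x => PySem.List.insertBy pvBefore x acc) acc).Pairwise pvLexLe := by
    induction l with
    | nil => intro acc h; simpa using h
    | cons p l ih =>
      intro acc h
      exact ih _ (pvInsertBy_pairwise p acc h)
  have : PySem.List.sorted2 l (fun p => p.1) (fun p => p.2) =
      l.foldl (fun acc x => PySem.List.insertBy pvBefore x acc) [] := rfl
  rw [this]
  exact hgen [] (by simp)

lemma pvTgts_pairwise (l : List (String × String)) (k : String)
    (h : l.Pairwise pvLexLe) : (pvTgts l k).Pairwise (· ≤ ·) := by
  unfold pvTgts
  rw [List.pairwise_map]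
  have hf : (l.filter (fun p => p.1 == k)).Pairwise pvLexLe := List.Pairwise.filter _ h
  refine List.Pairwise.imp_of_mem ?_ hf
  intro a b ha hb hab
  have ha' : a.1 = k := by simpa using (List.mem_filter.mp ha).2
  have hb' : b.1 = k := by simpa using (List.mem_filter.mp hb).2
  rcases hab with hlt | ⟨_, hle⟩
  · exact absurd hlt (by rw [ha', hb']; exact lt_irrefl _)
  · exact hle

lemma pvTgts_perm {l l' : List (String × String)} (k : String) (h : l.Perm l') :
    (pvTgts l k).Perm (pvTgts l' k) := (h.filter _).map _

lemma pvFst_pairwise (l : List (String × String)) (h : l.Pairwise pvLexLe) :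
    (l.map (fun p => p.1)).Pairwise (· ≤ ·) := by
  rw [List.pairwise_map]
  refine h.imp ?_
  intro a b hab
  rcases hab with hlt | ⟨heq, _⟩
  · exact le_of_lt hlt
  · exact le_of_eq heq

-- the per-key value of A equals the per-key value of B
lemma pvValue_eq (ps : List (String × String)) (k : String) :
    PySem.List.sorted ((pvTgts ps k).foldl PySem.Set.add []) (fun t => t) =
      (pvTgts (PySem.List.sorted2 ps (fun p => p.1) (fun p => p.2)) k).foldl pvAded [] := by
  have hpw := pvTgts_pairwise _ k (pvSorted2_pairwise ps)
  have haded := pvAded_ofList _ hpw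
  rw [haded.1, ← PySem.Set.ofList_eq_foldl]
  apply PySem.List.sorted_eq_of_perm_of_pairwise_lt
  · rw [List.perm_ext_iff_of_nodup (PySem.Set.nodup_ofList _) (PySem.Set.nodup_ofList _)]
    intro t
    rw [PySem.Set.mem_ofList, PySem.Set.mem_ofList]
    exact (pvTgts_perm k (PySem.List.sorted2_perm ps (fun p => p.1) (fun p => p.2) false)).mem_iff
  · exact haded.2

-- A's sorted key list equals B's key list
lemma pvKeys_eq (ps : List (String × String)) :
    PySem.List.sorted (PySem.Set.ofList (ps.map (fun p => p.1))) (fun k => k) =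
      PySem.Set.ofList ((PySem.List.sorted2 ps (fun p => p.1) (fun p => p.2)).map (fun p => p.1)) := by
  have hpw := pvFst_pairwise _ (pvSorted2_pairwise ps)
  have haded := pvAded_ofList _ hpw
  apply PySem.List.sorted_eq_of_perm_of_pairwise_lt
  · rw [List.perm_ext_iff_of_nodup (PySem.Set.nodup_ofList _) (PySem.Set.nodup_ofList _)]
    intro t
    rw [PySem.Set.mem_ofList, PySem.Set.mem_ofList]
    exact ((PySem.List.sorted2_perm ps (fun p => p.1) (fun p => p.2) false).map (fun p => p.1)).mem_iff
  · exact haded.2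

-- ===== VERDICT (by name: the statement is the Claim_ definition above) =====
theorem build_mutual_dependency_packages_by_package_py_spec : Claim_equal_build_mutual_dependency_packages_by_package_py := by
  intro ps _
  unfold Spec_build_mutual_dependency_packages_by_package_py
  unfold build_mutual_dependency_packages_by_package_py
  unfold build_mutual_dependency_packages_by_package_py_alt
  set l2 := PySem.List.sorted2 ps (fun p => p.1) (fun p => p.2) with hl2
  set dA := ps.foldl pvAStep PySem.Dict.empty with hdA
  set dB := l2.foldl pvBStep PySem.Dict.empty with hdB
  -- B's items
  have hBkeys : dB.keys = PySem.Set.ofList (l2.map (fun p => p.1)) := by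
    rw [hdB, pvB_keys]
    simp [PySem.Dict.keys_empty, PySem.Set.update_nil_left]
  have hBitems : dB.items = (PySem.Set.ofList (l2.map (fun p => p.1))).map
      (fun k => (k, (pvTgts l2 k).foldl pvAded [])) := by
    rw [PySem.Dict.items_eq_map_keys dB (by rw [hdB]; exact pvB_nodup l2) []]
    rw [hBkeys]
    apply List.map_congr_left
    intro k _
    rw [hdB, pvB_getD l2 _ k (by intro j hj; simp [PySem.Dict.contains_empty] at hj)]
    simp [PySem.Dict.getD_empty]
  -- A's items
  have hAitems : dA.items = (PySem.Set.ofList (ps.map (fun p => p.1))).map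
      (fun k => (k, dA.getD k [])) := by
    rw [PySem.Dict.items_eq_map_keys dA (by rw [hdA]; exact pvA_nodup ps) []]
    rw [hdA, pvA_keys]
  -- sorting A's items sorts the keys
  have hsorted : PySem.List.sorted dA.items (fun p => p.1) =
      (PySem.List.sorted (PySem.Set.ofList (ps.map (fun p => p.1))) (fun k => k)).map
        (fun k => (k, dA.getD k [])) := by
    apply PySem.List.sorted_eq_of_perm_of_pairwise_lt
    · rw [hAitems]
      exact (PySem.List.sorted_perm _ _ _).map _
    · rw [List.pairwise_map]
      exact PySem.List.sorted_ofList_pairwise_lt _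
  rw [hsorted, hBitems, pvKeys_eq, List.map_map]
  apply List.map_congr_left
  intro k _
  simp only [Function.comp]
  rw [hdA, pvA_getD ps _ k]
  rw [PySem.Dict.getD_empty, pvValue_eq]
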